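-- pv_equiv track=rewrite | github.com/pgsfernandes/pyrytiles | solver.py | find_unmatched_tiles
-- ===== SOURCE A (Python) =====
-- def find_unmatched_tiles(tile_color_sets: list, palettes: dict) -> list:
--     """
--     Returns the color sets of tiles that don't fit into any single palette.
--
--     :param tile_color_sets: list of sets of (R, G, B) tuples, one per tile
--     :param palettes: dict mapping palette_id -> set/list of (R, G, B) tuples
--     :return: list of sets of (R, G, B) tuples, same format as input
--     """
--     unmatched = []
--
--     for tile_colors in tile_color_sets:
--         for pal_colors in palettes.values():
--             if tile_colors.issubset(set(pal_colors)):
--                 break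
--         else:
--             unmatched.append(tile_colors)
--
--     return unmatched
-- ===== SOURCE B (Python) =====
-- def find_unmatched_tiles(tile_color_sets: list, palettes: dict) -> list:
--     """Same result as A: tiles whose colors fit no single palette.
--     Reversed nesting: iterate palettes on the outside, maintaining a
--     coverage array over tiles, then emit the uncovered tiles in order."""
--     matched = [False] * len(tile_color_sets)
--     for pal_colors in palettes.values():
--         pal = set(pal_colors)
--         for i, tile_colors in enumerate(tile_color_sets):
--             if tile_colors.issubset(pal):
--                 matched[i] = True
--     return [t for t, m in zip(tile_color_sets, matched) if not m]
-- ===== Notes on version B (the rewrite author's own statement) =====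
-- stated objective: faster
-- what changed: Reverses the loop nesting: instead of searching the palettes per tile with an early-exit inner loop (rebuilding set(pal_colors) for every tile-palette pair), B iterates palettes on the outer level, converts each palette to a set once, maintains a boolean coverage array over tiles, and finally emits the uncovered tiles in order.
import Mathlib
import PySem

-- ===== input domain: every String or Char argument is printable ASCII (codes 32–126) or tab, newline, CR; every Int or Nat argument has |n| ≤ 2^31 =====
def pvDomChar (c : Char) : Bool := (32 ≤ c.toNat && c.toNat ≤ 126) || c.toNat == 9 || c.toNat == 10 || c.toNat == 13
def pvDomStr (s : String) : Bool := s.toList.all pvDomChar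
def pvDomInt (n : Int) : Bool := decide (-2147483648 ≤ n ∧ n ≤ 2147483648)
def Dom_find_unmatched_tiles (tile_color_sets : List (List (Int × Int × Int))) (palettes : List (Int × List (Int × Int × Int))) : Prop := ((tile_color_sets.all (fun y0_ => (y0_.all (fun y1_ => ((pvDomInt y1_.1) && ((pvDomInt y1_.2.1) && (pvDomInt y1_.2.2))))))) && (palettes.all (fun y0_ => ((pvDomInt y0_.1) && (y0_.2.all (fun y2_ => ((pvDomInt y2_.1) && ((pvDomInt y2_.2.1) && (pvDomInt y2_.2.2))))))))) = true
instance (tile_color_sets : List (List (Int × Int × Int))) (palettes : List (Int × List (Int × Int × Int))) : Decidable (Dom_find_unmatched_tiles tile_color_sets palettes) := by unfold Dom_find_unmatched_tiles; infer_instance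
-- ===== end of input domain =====

-- B reverses the loop nesting (palettes outer, coverage array over tiles); same result, proved equal.

-- ===== PORT A =====
-- tile_colors.issubset(set(pal_colors))
def pvSubset (t p : List (Int × Int × Int)) : Bool := t.all (fun c => p.contains c)

-- for tile: for pal: if subset: break / else: append
def find_unmatched_tiles (tile_color_sets : List (List (Int × Int × Int))) (palettes : List (Int × List (Int × Int × Int))) : List (List (Int × Int × Int)) :=
  tile_color_sets.foldl (fun unmatched tile_colors =>
    if palettes.any (fun pv => pvSubset tile_colors pv.2) then unmatched
    else unmatched ++ [tile_colors]) []

-- ===== PORT B =====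
def find_unmatched_tiles_alt (tile_color_sets : List (List (Int × Int × Int))) (palettes : List (Int × List (Int × Int × Int))) : List (List (Int × Int × Int)) :=
  let matched := palettes.foldl
    (fun m pv => List.zipWith (fun mi t => mi || pvSubset t pv.2) m tile_color_sets)
    (tile_color_sets.map (fun _ => false))
  (tile_color_sets.zip matched).foldl
    (fun out p => if p.2 then out else out ++ [p.1]) []

-- ===== PRECONDITION & SPEC =====
def Spec_find_unmatched_tiles (tile_color_sets : List (List (Int × Int × Int))) (palettes : List (Int × List (Int × Int × Int))) (out : List (List (Int × Int × Int))) : Prop := out = find_unmatched_tiles_alt tile_color_sets palettes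
instance (tile_color_sets : List (List (Int × Int × Int))) (palettes : List (Int × List (Int × Int × Int))) (out : List (List (Int × Int × Int))) : Decidable (Spec_find_unmatched_tiles tile_color_sets palettes out) := by unfold Spec_find_unmatched_tiles; infer_instance

-- ===== CLAIM (what is proved, stated in full; the proofs are below) =====
def Claim_equal_find_unmatched_tiles : Prop := ∀ (tile_color_sets : List (List (Int × Int × Int))) (palettes : List (Int × List (Int × Int × Int))), Dom_find_unmatched_tiles tile_color_sets palettes → Spec_find_unmatched_tiles tile_color_sets palettes (find_unmatched_tiles tile_color_sets palettes)

-- ===== LEMMAS AND PROOFS =====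

-- one palette step of B's coverage update, on a map
theorem pvZipWith_map (tcs : List (List (Int × Int × Int))) (g : List (Int × Int × Int) → Bool) (s : List (Int × Int × Int) → Bool) :
    List.zipWith (fun mi t => mi || s t) (tcs.map g) tcs = tcs.map (fun t => g t || s t) := by
  induction tcs with
  | nil => rfl
  | cons h tl ih => simp [ih]

-- B's whole coverage fold, characterised
theorem pvMatched_eq (palettes : List (Int × List (Int × Int × Int))) (tcs : List (List (Int × Int × Int))) (g : List (Int × Int × Int) → Bool) :
    palettes.foldl (fun m pv => List.zipWith (fun mi t => mi || pvSubset t pv.2) m tcs) (tcs.map g)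
      = tcs.map (fun t => g t || palettes.any (fun pv => pvSubset t pv.2)) := by
  induction palettes generalizing g with
  | nil => simp
  | cons pv rest ih =>
    simp only [List.foldl_cons, pvZipWith_map, ih, List.any_cons]
    refine List.map_congr_left (fun t _ => ?_)
    simp [Bool.or_assoc]

-- B's emission fold over the zip = filter
theorem pvEmit_eq (tcs : List (List (Int × Int × Int))) (h : List (Int × Int × Int) → Bool) (acc : List (List (Int × Int × Int))) :
    (tcs.zip (tcs.map h)).foldl (fun out p => if p.2 then out else out ++ [p.1]) acc
      = acc ++ tcs.filter (fun t => !h t) := by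
  induction tcs generalizing acc with
  | nil => simp
  | cons x tl ih =>
    simp only [List.map_cons, List.zip_cons_cons, List.foldl_cons, List.filter_cons]
    by_cases hx : h x = true <;> simp [hx, ih]

-- A's fold = filter
theorem pvA_eq (tcs : List (List (Int × Int × Int))) (palettes : List (Int × List (Int × Int × Int))) (acc : List (List (Int × Int × Int))) :
    tcs.foldl (fun unmatched t =>
        if palettes.any (fun pv => pvSubset t pv.2) then unmatched else unmatched ++ [t]) acc
      = acc ++ tcs.filter (fun t => !(palettes.any (fun pv => pvSubset t pv.2))) := by
  induction tcs generalizing acc with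
  | nil => simp
  | cons x tl ih =>
    simp only [List.foldl_cons, List.filter_cons]
    by_cases hx : palettes.any (fun pv => pvSubset x pv.2) = true <;> simp [hx, ih]

-- ===== VERDICT (by name: the statement is the Claim_ definition above) =====
theorem find_unmatched_tiles_spec : Claim_equal_find_unmatched_tiles := by
  intro tcs palettes _
  unfold Spec_find_unmatched_tiles find_unmatched_tiles find_unmatched_tiles_alt
  rw [pvMatched_eq, pvEmit_eq, pvA_eq]
  simp
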